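-- pv_equiv track=rewrite | github.com/hadi-technology/corruption-structure-defeat-architecture | run_experiments.py | extract_binding_from_pattern
-- ===== SOURCE A (Python) =====
-- from typing import Dict, Iterable, List, Optional, Sequence, Tuple
--
-- VARIABLE_TOKEN = "var_x"
--
-- def extract_binding_from_pattern(pattern: str, grounded: str) -> Optional[str]:
--     p = pattern.split("|")
--     g = grounded.split("|")
--     if len(p) != len(g):
--         return None
--
--     binding: Optional[str] = None
--     for pp, gg in zip(p, g):
--         if pp == VARIABLE_TOKEN:
--             if binding is None:
--                 binding = gg
--             elif binding != gg:
--                 return None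
--             continue
--         if pp != gg:
--             return None
--     return binding
-- ===== SOURCE B (Python) =====
-- VARIABLE_TOKEN = "var_x"
--
-- def extract_binding_from_pattern(pattern, grounded):
--     p = pattern.split("|")
--     g = grounded.split("|")
--     if len(p) != len(g):
--         return None
--     pairs = list(zip(p, g))
--     # pass 1: every non-variable position must match exactly
--     if any(pp != gg for pp, gg in pairs if pp != VARIABLE_TOKEN):
--         return None
--     # pass 2: collect the distinct grounded values at variable positions
--     vals = {gg for pp, gg in pairs if pp == VARIABLE_TOKEN}
--     if len(vals) != 1:
--         return None
--     return vals.pop()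
-- ===== Notes on version B (the rewrite author's own statement) =====
-- stated objective: simpler
-- what changed: Replaced the single accumulator-threading loop with early returns by two independent passes: one pass checks all non-variable positions match, a second collects the distinct grounded values at variable positions into a set and returns its unique element if the set is a singleton.
import Mathlib
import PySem

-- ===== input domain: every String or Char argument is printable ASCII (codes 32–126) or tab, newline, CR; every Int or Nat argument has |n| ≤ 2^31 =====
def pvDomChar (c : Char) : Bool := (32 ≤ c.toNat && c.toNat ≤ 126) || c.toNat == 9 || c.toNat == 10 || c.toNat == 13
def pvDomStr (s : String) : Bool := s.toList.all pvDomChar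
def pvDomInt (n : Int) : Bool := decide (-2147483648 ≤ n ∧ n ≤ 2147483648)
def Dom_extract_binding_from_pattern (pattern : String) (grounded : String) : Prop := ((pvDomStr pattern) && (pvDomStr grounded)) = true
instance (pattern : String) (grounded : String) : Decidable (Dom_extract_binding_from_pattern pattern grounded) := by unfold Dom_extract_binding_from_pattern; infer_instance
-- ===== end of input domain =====

-- B replaces A's single accumulator-threading loop (with early returns) by two
-- independent passes: a non-variable match check, then a distinct-value set check; objective: simpler.

-- ===== PORT A =====
-- A's for-loop with the threaded 'binding' accumulator and early returns
def ebpLoop : List (String × String) → Option String → Option String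
  | [], binding => binding
  | (pp, gg) :: rest, binding =>
    if pp == "var_x" then
      match binding with
      | none => ebpLoop rest (some gg)
      | some b => if b != gg then none else ebpLoop rest binding
    else if pp != gg then none else ebpLoop rest binding

def extract_binding_from_pattern (pattern : String) (grounded : String) : Option String :=
  let p := (PySem.Str.split? pattern "|").getD []   -- sep "|" ≠ "": split? is always some here
  let g := (PySem.Str.split? grounded "|").getD []
  if p.length ≠ g.length then none
  else ebpLoop (p.zip g) none

-- ===== PORT B =====
def extract_binding_from_pattern_alt (pattern : String) (grounded : String) : Option String :=
  let p := (PySem.Str.split? pattern "|").getD []   -- sep "|" ≠ "": split? is always some here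
  let g := (PySem.Str.split? grounded "|").getD []
  if p.length ≠ g.length then none
  else
    let pairs := p.zip g
    -- pass 1: any mismatch at a non-variable position?
    if pairs.any (fun pr => pr.1 != "var_x" && pr.1 != pr.2) then none
    else
      -- pass 2: set of grounded values at variable positions
      let vals : PySem.Set String := PySem.Set.ofList ((pairs.filter (fun pr => pr.1 == "var_x")).map Prod.snd)
      if vals.length = 1 then vals.head? else none

-- ===== PRECONDITION & SPEC =====
def Spec_extract_binding_from_pattern (pattern : String) (grounded : String) (out : Option String) : Prop := out = extract_binding_from_pattern_alt pattern grounded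
instance (pattern : String) (grounded : String) (out : Option String) : Decidable (Spec_extract_binding_from_pattern pattern grounded out) := by unfold Spec_extract_binding_from_pattern; infer_instance

-- ===== CLAIM (what is proved, stated in full; the proofs are below) =====
def Claim_equal_extract_binding_from_pattern : Prop := ∀ (pattern : String) (grounded : String), Dom_extract_binding_from_pattern pattern grounded → Spec_extract_binding_from_pattern pattern grounded (extract_binding_from_pattern pattern grounded)

-- ===== LEMMAS AND PROOFS =====

-- fold the variable-position values into a binding; none = conflict, some b = final binding
def ebpRun : Option String → List String → Option (Option String)
  | b, [] => some b
  | none, v :: vs => ebpRun (some v) vs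
  | some u, v :: vs => if u = v then ebpRun (some u) vs else none

theorem ebpLoop_eq (pairs : List (String × String)) (b : Option String) :
    ebpLoop pairs b =
      if pairs.any (fun pr => pr.1 != "var_x" && pr.1 != pr.2) then none
      else (ebpRun b ((pairs.filter (fun pr => pr.1 == "var_x")).map Prod.snd)).join := by
  induction pairs generalizing b with
  | nil => simp [ebpLoop, ebpRun]
  | cons hd tl ih =>
    obtain ⟨pp, gg⟩ := hd
    by_cases hv : pp = "var_x"
    · subst hv
      cases b with
      | none => simp [ebpLoop, ebpRun, ih]; rfl
      | some u =>
        by_cases hu : u = gg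
        · subst hu; simp [ebpLoop, ebpRun, ih]; rfl
        · simp only [ebpLoop, List.any_cons, List.filter_cons, List.map_cons,
            BEq.rfl, if_pos, bne_self_eq_false, Bool.false_and, Bool.false_or]
          rw [if_pos (by simpa [bne_iff_ne] using hu)]
          simp [ebpRun, hu]
    · by_cases he : pp = gg
      · subst he
        simp [ebpLoop, ih, hv, bne_iff_ne]
        simp only [bne_self_eq_false, Bool.and_false, Bool.false_or]
      · simp [ebpLoop, hv, he, bne_iff_ne]

theorem ebpRun_some (u : String) (vs : List String) :
    ebpRun (some u) vs = if vs.all (fun v => v = u) then some (some u) else none := by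
  induction vs with
  | nil => simp [ebpRun]
  | cons v vs ih =>
    by_cases h : u = v
    · subst h; simp [ebpRun, ih]
    · simp only [ebpRun, if_neg h, List.all_cons]
      rw [if_neg]
      simp only [Bool.and_eq_true, decide_eq_true_eq]
      exact fun hc => h hc.1.symm

theorem set_foldl_prefix (s : PySem.Set String) (vs : List String) :
    ∃ t, vs.foldl PySem.Set.add s = s ++ t := by
  induction vs generalizing s with
  | nil => exact ⟨[], by simp⟩
  | cons v vs ih =>
    obtain ⟨t, ht⟩ := ih (PySem.Set.add s v)
    rw [List.foldl_cons, ht]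
    by_cases h : v ∈ s
    · have hadd : PySem.Set.add s v = s := by simp [PySem.Set.add, PySem.Set.contains, h]
      exact ⟨t, by rw [hadd]⟩
    · have hadd : PySem.Set.add s v = s ++ [v] := by simp [PySem.Set.add, PySem.Set.contains, h]
      exact ⟨v :: t, by rw [hadd]; simp⟩

theorem foldl_add_self (v : String) (ws : List String) (h : ∀ x ∈ ws, x = v) :
    ws.foldl PySem.Set.add [v] = [v] := by
  induction ws with
  | nil => rfl
  | cons w ws ih =>
    have hw : w = v := h w (by simp)
    subst hw
    rw [List.foldl_cons,
      show PySem.Set.add [w] w = [w] by simp [PySem.Set.add, PySem.Set.contains]]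
    exact ih (fun x hx => h x (List.mem_cons_of_mem _ hx))

theorem set_singleton_iff (v : String) (vs : List String) :
    PySem.Set.ofList (v :: vs) = [v] ↔ vs.all (fun x => x = v) := by
  constructor
  · intro h
    rw [List.all_eq_true]
    intro x hx
    have hm : x ∈ PySem.Set.ofList (v :: vs) := by
      rw [PySem.Set.mem_ofList]; simp [hx]
    rw [h] at hm
    simpa using hm
  · intro h
    have h' : ∀ x ∈ vs, x = v := by simpa [List.all_eq_true] using h
    show (v :: vs).foldl PySem.Set.add [] = [v]
    rw [List.foldl_cons,
      show PySem.Set.add ([] : PySem.Set String) v = [v] by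
        simp [PySem.Set.add, PySem.Set.contains]]
    exact foldl_add_self v vs h'

theorem ofList_cons_head? (v : String) (vs : List String) :
    (PySem.Set.ofList (v :: vs)).head? = some v := by
  show ((v :: vs).foldl PySem.Set.add []).head? = some v
  rw [List.foldl_cons,
    show PySem.Set.add ([] : PySem.Set String) v = [v] by
      simp [PySem.Set.add, PySem.Set.contains]]
  obtain ⟨t, ht⟩ := set_foldl_prefix [v] vs
  rw [ht]; rfl

theorem ebpRun_none (vs : List String) :
    (ebpRun none vs).join =
      if (PySem.Set.ofList vs).length = 1 then (PySem.Set.ofList vs).head? else none := by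
  cases vs with
  | nil => simp [ebpRun, PySem.Set.ofList]
  | cons v vs =>
    rw [show ebpRun none (v :: vs) = ebpRun (some v) vs from rfl, ebpRun_some]
    by_cases h : vs.all (fun x => x = v)
    · have hs := (set_singleton_iff v vs).mpr h
      simp [h, hs]
    · have hne : PySem.Set.ofList (v :: vs) ≠ [v] :=
        fun hc => h ((set_singleton_iff v vs).mp hc)
      have hhead := ofList_cons_head? v vs
      have hlen : (PySem.Set.ofList (v :: vs)).length ≠ 1 := by
        intro hc
        apply hne
        match hm : PySem.Set.ofList (v :: vs) with
        | [x] =>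
          rw [hm] at hhead
          simp only [List.head?_cons, Option.some_inj] at hhead
          rw [hhead]
        | [] => rw [hm] at hc; simp at hc
        | x :: y :: r => rw [hm] at hc; simp at hc
      simp [h, hlen]

theorem extract_binding_from_pattern_eq (pattern grounded : String) :
    extract_binding_from_pattern pattern grounded = extract_binding_from_pattern_alt pattern grounded := by
  unfold extract_binding_from_pattern extract_binding_from_pattern_alt
  set p := (PySem.Str.split? pattern "|").getD [] with hp
  set g := (PySem.Str.split? grounded "|").getD [] with hg
  by_cases hl : p.length ≠ g.length
  · simp [hl]
  · simp only [hl, if_false]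
    rw [ebpLoop_eq, ebpRun_none]

-- ===== VERDICT (by name: the statement is the Claim_ definition above) =====
theorem extract_binding_from_pattern_spec : Claim_equal_extract_binding_from_pattern := by
  intro pattern grounded _
  unfold Spec_extract_binding_from_pattern
  exact extract_binding_from_pattern_eq pattern grounded
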